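-- pv_equiv track=rewrite | github.com/AlgoritmiNarvik/SaMuGeD-Algoritmi-DrDreSamplerAI-2024 | testing_tools/test_scripts/almaz_scripts/PatternSegmentationNgrams.py | find_frequent_patterns
-- ===== SOURCE A (Python) =====
-- from collections import defaultdict, Counter
--
-- def find_ngrams(sequence, n):
--     ngrams = [tuple(sequence[i:i+n]) for i in range(len(sequence)-n+1)]
--     return ngrams
--
-- def find_frequent_patterns(sequence, max_ngram_size, min_occurrences):
--     longest_frequent_patterns = []
--     ngram_frequencies = {}
--
--     # Analyze n-grams from longest to shortest
--     for n in range(max_ngram_size, 0, -1):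
--         ngrams = find_ngrams(sequence, n)
--         ngram_counts = Counter(ngrams)
--         frequent_patterns = [(ngram, count) for ngram, count in ngram_counts.items() if count >= min_occurrences]
--
--         for pattern, count in frequent_patterns:
--             if pattern not in ngram_frequencies:
--                 ngram_frequencies[pattern] = count
--
--         if frequent_patterns:
--             longest_frequent_patterns = frequent_patterns
--             break  # Stop as soon as we find the longest frequent pattern
--
--     return longest_frequent_patterns, ngram_frequencies
-- ===== SOURCE B (Python) =====
-- from collections import Counter
--
-- def find_frequent_patterns(sequence, max_ngram_size, min_occurrences):
--     # The set of lengths n admitting a pattern with >= min_occurrences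
--     # occurrences is downward-closed (a frequent n-gram's prefix is a frequent
--     # (n-1)-gram), so binary-search for the largest such n instead of
--     # scanning n downwards one by one.
--     def counts_at(n):
--         return Counter(tuple(sequence[i:i + n]) for i in range(len(sequence) - n + 1))
--
--     def has_frequent(n):
--         return any(c >= min_occurrences for _, c in counts_at(n).items())
--
--     lo, hi, best = 1, min(max_ngram_size, len(sequence)), 0
--     while lo <= hi:
--         mid = (lo + hi) // 2
--         if has_frequent(mid):
--             best, lo = mid, mid + 1
--         else:
--             hi = mid - 1
--     if best == 0:
--         return [], {}
--     patterns = [(p, c) for p, c in counts_at(best).items() if c >= min_occurrences]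
--     return patterns, dict(patterns)
-- ===== Notes on version B (the rewrite author's own statement) =====
-- stated objective: faster
-- what changed: A scans n-gram sizes linearly from max_ngram_size downwards until a frequent size is found; B exploits that 'some n-gram of size n occurs >= min_occurrences times' is monotone (downward-closed) in n and binary-searches for the largest such size over [1, min(max_ngram_size, len(sequence))], then counts once at that size.
import Mathlib
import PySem

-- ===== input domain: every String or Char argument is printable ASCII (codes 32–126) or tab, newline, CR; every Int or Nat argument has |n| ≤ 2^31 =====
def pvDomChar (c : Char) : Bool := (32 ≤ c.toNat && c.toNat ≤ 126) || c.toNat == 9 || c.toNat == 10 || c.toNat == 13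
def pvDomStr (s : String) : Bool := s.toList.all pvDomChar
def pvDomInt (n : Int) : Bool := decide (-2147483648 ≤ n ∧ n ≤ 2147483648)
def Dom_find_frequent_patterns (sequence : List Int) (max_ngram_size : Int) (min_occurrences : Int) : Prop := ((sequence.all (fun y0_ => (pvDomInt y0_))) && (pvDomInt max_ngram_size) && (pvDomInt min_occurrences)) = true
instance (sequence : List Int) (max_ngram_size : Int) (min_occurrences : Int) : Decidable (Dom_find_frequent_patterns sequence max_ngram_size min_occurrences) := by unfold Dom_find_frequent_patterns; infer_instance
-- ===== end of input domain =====

-- B replaces A's linear descent over n-gram sizes by a binary search for the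
-- largest frequent size (frequency-existence is monotone in the size); objective: faster.

-- ===== PORT A =====
def find_ngrams (sequence : List Int) (n : Int) : List (List Int) :=
  (PySem.List.pyRange 0 (PySem.List.len sequence - n + 1) 1).map
    (fun i => PySem.List.slice sequence (some i) (some (i + n)))

def ffpLoop (sequence : List Int) (min_occurrences : Int) (ns : List Int)
    (lfp : List (List Int × Int)) (freq : PySem.Dict (List Int) Int) :
    (List (List Int × Int)) × (List (List Int × Int)) :=
  match ns with
  | [] => (lfp, freq.items)
  | n :: rest =>
      let ngrams := find_ngrams sequence n
      let ngram_counts := PySem.Dict.counter ngrams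
      let fp := ngram_counts.items.filter (fun p => decide (min_occurrences ≤ p.2))
      let freq' := fp.foldl (fun d p => if d.contains p.1 then d else d.insert p.1 p.2) freq
      if fp.isEmpty then ffpLoop sequence min_occurrences rest lfp freq'
      else (fp, freq'.items)

def find_frequent_patterns (sequence : List Int) (max_ngram_size : Int) (min_occurrences : Int) : (List (List Int × Int)) × (List (List Int × Int)) :=
  ffpLoop sequence min_occurrences (PySem.List.pyRange max_ngram_size 0 (-1)) [] PySem.Dict.empty

-- ===== PORT B =====
def ffpAltCounts (sequence : List Int) (n : Int) : PySem.Dict (List Int) Int :=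
  PySem.Dict.counter ((PySem.List.pyRange 0 (PySem.List.len sequence - n + 1) 1).map
    (fun i => PySem.List.slice sequence (some i) (some (i + n))))

def ffpAltHas (sequence : List Int) (min_occurrences : Int) (n : Int) : Bool :=
  (ffpAltCounts sequence n).items.any (fun p => decide (min_occurrences ≤ p.2))

def ffpAltSearch (sequence : List Int) (min_occurrences lo hi best : Int) : Int :=
  if h : lo ≤ hi then
    if ffpAltHas sequence min_occurrences (PySem.Int.floordiv (lo + hi) 2) then
      ffpAltSearch sequence min_occurrences (PySem.Int.floordiv (lo + hi) 2 + 1) hi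
        (PySem.Int.floordiv (lo + hi) 2)
    else
      ffpAltSearch sequence min_occurrences lo (PySem.Int.floordiv (lo + hi) 2 - 1) best
  else best
termination_by (hi + 1 - lo).toNat
decreasing_by
  · have := PySem.Int.floordiv_two_mid_bounds h; omega
  · have := PySem.Int.floordiv_two_mid_bounds h; omega

def find_frequent_patterns_alt (sequence : List Int) (max_ngram_size : Int) (min_occurrences : Int) : (List (List Int × Int)) × (List (List Int × Int)) :=
  let best := ffpAltSearch sequence min_occurrences 1 (min max_ngram_size (PySem.List.len sequence)) 0
  if best = 0 then ([], [])
  else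
    let patterns := (ffpAltCounts sequence best).items.filter (fun p => decide (min_occurrences ≤ p.2))
    (patterns, (patterns.foldl (fun d p => d.insert p.1 p.2) PySem.Dict.empty).items)

-- ===== PRECONDITION & SPEC =====
def Spec_find_frequent_patterns (sequence : List Int) (max_ngram_size : Int) (min_occurrences : Int) (out : (List (List Int × Int)) × (List (List Int × Int))) : Prop := out = find_frequent_patterns_alt sequence max_ngram_size min_occurrences
instance (sequence : List Int) (max_ngram_size : Int) (min_occurrences : Int) (out : (List (List Int × Int)) × (List (List Int × Int))) : Decidable (Spec_find_frequent_patterns sequence max_ngram_size min_occurrences out) := by unfold Spec_find_frequent_patterns; infer_instance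

-- ===== CLAIM (what is proved, stated in full; the proofs are below) =====
def Claim_equal_find_frequent_patterns : Prop := ∀ (sequence : List Int) (max_ngram_size : Int) (min_occurrences : Int), Dom_find_frequent_patterns sequence max_ngram_size min_occurrences → Spec_find_frequent_patterns sequence max_ngram_size min_occurrences (find_frequent_patterns sequence max_ngram_size min_occurrences)

-- ===== LEMMAS AND PROOFS =====

-- the frequent patterns of size n, as both programs compute them
def pvFP (sequence : List Int) (min_occurrences n : Int) : List (List Int × Int) :=
  (PySem.Dict.counter (find_ngrams sequence n)).items.filter (fun p => decide (min_occurrences ≤ p.2))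

-- the common result determined by the winning size N (0 = no frequent pattern)
def pvOut (sequence : List Int) (min_occurrences : Int) (N : Nat) : (List (List Int × Int)) × (List (List Int × Int)) :=
  if N = 0 then ([], [])
  else (pvFP sequence min_occurrences (N : Int),
        ((pvFP sequence min_occurrences (N : Int)).foldl
          (fun d p => if d.contains p.1 then d else d.insert p.1 p.2) PySem.Dict.empty).items)

-- the n-grams of size m, positionally
def pvGram (sequence : List Int) (m k : Nat) : List Int := (sequence.drop k).take m

lemma find_ngrams_eq (sequence : List Int) (m : Nat) :
    find_ngrams sequence (m : Int) = (List.range (sequence.length + 1 - m)).map (pvGram sequence m) := by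
  unfold find_ngrams
  rw [PySem.List.pyRange_one, PySem.List.len_eq]
  have ht : ((sequence.length : Int) - (m : Int) + 1 - 0).toNat = sequence.length + 1 - m := by omega
  rw [ht, List.map_map]
  apply List.map_congr_left
  intro k hk
  simp only [Function.comp_apply, zero_add, pvGram]
  rw [PySem.List.slice_natCast_add]

lemma ffpAltCounts_eq (sequence : List Int) (n : Int) :
    ffpAltCounts sequence n = PySem.Dict.counter (find_ngrams sequence n) := rfl

lemma hasF_iff (sequence : List Int) (minocc n : Int) :
    ffpAltHas sequence minocc n = true ↔
      ∃ g ∈ find_ngrams sequence n, minocc ≤ ((find_ngrams sequence n).count g : Int) := by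
  unfold ffpAltHas
  rw [ffpAltCounts_eq, PySem.Dict.items_counter, List.any_map]
  simp only [List.any_eq_true, Function.comp_apply, decide_eq_true_eq, PySem.Set.mem_ofList]

lemma hasF_antitone (sequence : List Int) (minocc : Int) (m : Nat)
    (h : ffpAltHas sequence minocc ((m + 1 : Nat) : Int) = true) :
    ffpAltHas sequence minocc (m : Int) = true := by
  rw [hasF_iff, find_ngrams_eq] at h ⊢
  obtain ⟨g, hg, hc⟩ := h
  obtain ⟨k, hk, hgk⟩ := List.mem_map.mp hg
  have hk' : k < sequence.length + 1 - (m + 1) := List.mem_range.mp hk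
  have hLm : m + 1 ≤ sequence.length := by omega
  refine ⟨pvGram sequence m k, List.mem_map_of_mem (List.mem_range.mpr (by omega)), ?_⟩
  -- taking the length-m prefix of each (m+1)-gram gives the m-grams at the same positions
  have hmapmap : ((List.range (sequence.length + 1 - (m + 1))).map (pvGram sequence (m + 1))).map
      (List.take m) = (List.range (sequence.length + 1 - (m + 1))).map (pvGram sequence m) := by
    rw [List.map_map]
    apply List.map_congr_left
    intro j _
    simp only [Function.comp_apply, pvGram, List.take_take, min_eq_left (Nat.le_succ m)]
  have h1 : ((List.range (sequence.length + 1 - (m + 1))).map (pvGram sequence (m + 1))).count g ≤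
      ((List.range (sequence.length + 1 - (m + 1))).map (pvGram sequence m)).count (pvGram sequence m k) := by
    have := List.count_le_count_map (l := (List.range (sequence.length + 1 - (m + 1))).map
      (pvGram sequence (m + 1))) (f := List.take m) (x := g)
    rw [hmapmap] at this
    have hTake : g.take m = pvGram sequence m k := by
      rw [← hgk]; simp only [pvGram, List.take_take, min_eq_left (Nat.le_succ m)]
    rwa [hTake] at this
  have h2 : ((List.range (sequence.length + 1 - (m + 1))).map (pvGram sequence m)).count
      (pvGram sequence m k) ≤
      ((List.range (sequence.length + 1 - m)).map (pvGram sequence m)).count (pvGram sequence m k) :=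
    List.Sublist.count_le _ ((List.range_sublist.mpr (by omega)).map _)
  calc minocc ≤ _ := hc
    _ ≤ _ := by exact_mod_cast Nat.cast_le.mpr (le_trans h1 h2)

lemma hasF_down (sequence : List Int) (minocc : Int) (a b : Nat) (hab : a ≤ b)
    (h : ffpAltHas sequence minocc (b : Int) = true) :
    ffpAltHas sequence minocc (a : Int) = true := by
  induction b with
  | zero => exact (Nat.le_zero.mp hab) ▸ h
  | succ b ih =>
    rcases Nat.lt_or_ge a (b + 1) with hlt | hge
    · exact ih (by omega) (hasF_antitone sequence minocc b h)
    · exact (by omega : a = b + 1) ▸ h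

lemma hasF_false_of_gt_len (sequence : List Int) (minocc : Int) (m : Nat)
    (h : sequence.length < m) : ffpAltHas sequence minocc (m : Int) = false := by
  unfold ffpAltHas ffpAltCounts
  rw [PySem.List.len_eq, PySem.List.pyRange_one_eq_nil (by omega)]
  rfl

lemma fp_eq_nil_iff (sequence : List Int) (minocc n : Int) :
    pvFP sequence minocc n = [] ↔ ffpAltHas sequence minocc n = false := by
  unfold pvFP ffpAltHas
  rw [ffpAltCounts_eq]
  rw [List.filter_eq_nil_iff, List.any_eq_false]

lemma findGreatest_restrict (sequence : List Int) (minocc : Int) (M₁ M₂ : Nat) (h : M₁ ≤ M₂)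
    (hfalse : ∀ k, M₁ < k → k ≤ M₂ → ¬ (ffpAltHas sequence minocc (k : Int) = true)) :
    Nat.findGreatest (fun m => ffpAltHas sequence minocc (m : Int) = true) M₂ =
    Nat.findGreatest (fun m => ffpAltHas sequence minocc (m : Int) = true) M₁ := by
  induction M₂ with
  | zero => rw [Nat.le_zero.mp h]
  | succ M ih =>
    rcases Nat.lt_or_ge M₁ (M + 1) with hlt | hge
    · rw [Nat.findGreatest_succ, if_neg (hfalse (M + 1) hlt (le_refl _))]
      exact ih (by omega) (fun k h1 h2 => hfalse k h1 (by omega))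
    · rw [(by omega : M₁ = M + 1)]

lemma loopA_eq (sequence : List Int) (minocc : Int) (m : Nat) :
    ffpLoop sequence minocc (PySem.List.pyRange (m : Int) 0 (-1)) [] PySem.Dict.empty =
    pvOut sequence minocc (Nat.findGreatest (fun k => ffpAltHas sequence minocc (k : Int) = true) m) := by
  induction m with
  | zero =>
    rw [PySem.List.pyRange_neg_one_eq_nil (by omega), Nat.findGreatest_zero]
    rfl
  | succ m ih =>
    rw [PySem.List.pyRange_neg_one_cons (by exact_mod_cast Nat.succ_pos m),
      (by push_cast; ring : ((m + 1 : Nat) : Int) - 1 = (m : Int)), Nat.findGreatest_succ]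
    by_cases hP : ffpAltHas sequence minocc ((m + 1 : Nat) : Int) = true
    · have hfp : pvFP sequence minocc ((m + 1 : Nat) : Int) ≠ [] := by
        intro hnil
        rw [(fp_eq_nil_iff sequence minocc _).mp hnil] at hP
        exact Bool.false_ne_true hP
      rw [if_pos hP]
      show ffpLoop _ _ _ _ _ = _
      simp only [ffpLoop]
      have hie : (List.filter (fun p => decide (minocc ≤ p.2))
          (PySem.Dict.counter (find_ngrams sequence ((m + 1 : Nat) : Int))).items).isEmpty = false := by
        simp only [List.isEmpty_eq_false_iff]; exact hfp
      rw [hie]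
      simp only [Bool.false_eq_true, if_false]
      unfold pvOut
      rw [if_neg (Nat.succ_ne_zero m)]
      rfl
    · have hfp : pvFP sequence minocc ((m + 1 : Nat) : Int) = [] :=
        (fp_eq_nil_iff sequence minocc _).mpr (Bool.not_eq_true _ ▸ hP)
      rw [if_neg hP]
      simp only [ffpLoop]
      have hfp' : ((PySem.Dict.counter (find_ngrams sequence ((m + 1 : Nat) : Int))).items.filter
          (fun p => decide (minocc ≤ p.2))) = [] := hfp
      rw [hfp']
      simpa using ih

lemma search_eq (sequence : List Int) (minocc M₀ : Int) (N : Nat)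
    (hchar : ∀ n : Int, 1 ≤ n → n ≤ M₀ → (ffpAltHas sequence minocc n = true ↔ n ≤ (N : Int))) :
    ∀ (k : Nat) (lo hi best : Int), (hi + 1 - lo).toNat = k → 1 ≤ lo → best = lo - 1 →
      best ≤ (N : Int) → (N : Int) ≤ hi → hi ≤ M₀ →
      ffpAltSearch sequence minocc lo hi best = (N : Int) := by
  intro k
  induction k using Nat.strong_induction_on with
  | _ k ih =>
    intro lo hi best hk hlo hbest hbN hNhi hhiM
    rw [ffpAltSearch]
    by_cases hcmp : lo ≤ hi
    · rw [dif_pos hcmp]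
      have hmid := PySem.Int.floordiv_two_mid_bounds hcmp
      by_cases hP : ffpAltHas sequence minocc (PySem.Int.floordiv (lo + hi) 2) = true
      · rw [if_pos hP]
        have hmN : PySem.Int.floordiv (lo + hi) 2 ≤ (N : Int) :=
          (hchar _ (by omega) (by omega)).mp hP
        exact ih ((hi + 1 - (PySem.Int.floordiv (lo + hi) 2 + 1)).toNat) (by omega) _ _ _ rfl
          (by omega) (by omega) (by omega) hNhi hhiM
      · rw [if_neg hP]
        have hmN : ¬ (PySem.Int.floordiv (lo + hi) 2 ≤ (N : Int)) := fun hle =>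
          hP ((hchar _ (by omega) (by omega)).mpr hle)
        exact ih ((PySem.Int.floordiv (lo + hi) 2 - 1 + 1 - lo).toNat) (by omega) _ _ _ rfl
          hlo hbest hbN (by omega) (by omega)
    · rw [dif_neg hcmp]
      omega

lemma fold_ins_eq (l : List (List Int × Int)) (d : PySem.Dict (List Int) Int)
    (hnd : (l.map Prod.fst).Nodup) (hfree : ∀ p ∈ l, d.contains p.1 = false) :
    l.foldl (fun d p => if d.contains p.1 then d else d.insert p.1 p.2) d =
    l.foldl (fun d p => d.insert p.1 p.2) d := by
  induction l generalizing d with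
  | nil => rfl
  | cons p t ih =>
    simp only [List.foldl_cons]
    rw [if_neg (by rw [hfree p (List.mem_cons_self)]; exact Bool.false_ne_true)]
    apply ih
    · rw [List.map_cons] at hnd; exact (List.nodup_cons.mp hnd).2
    · intro q hq
      rw [PySem.Dict.contains_insert]
      have hne : q.1 ≠ p.1 := by
        rw [List.map_cons] at hnd
        have := (List.nodup_cons.mp hnd).1
        intro he; exact this (he ▸ List.mem_map_of_mem hq)
      rw [beq_eq_false_iff_ne.mpr hne, hfree q (List.mem_cons_of_mem _ hq)]
      rfl

lemma fp_keys_nodup (sequence : List Int) (minocc n : Int) :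
    ((pvFP sequence minocc n).map Prod.fst).Nodup := by
  have hsub : List.Sublist ((pvFP sequence minocc n).map Prod.fst)
      (((PySem.Dict.counter (find_ngrams sequence n)).items).map Prod.fst) :=
    List.Sublist.map Prod.fst List.filter_sublist
  apply List.Nodup.sublist hsub
  rw [PySem.Dict.items_counter, List.map_map]
  have : (Prod.fst ∘ fun k : List Int => (k, (List.count k (find_ngrams sequence n) : Int))) = id := rfl
  rw [this, List.map_id]
  exact PySem.Set.nodup_ofList (find_ngrams sequence n)

lemma alt_eq_pvOut (sequence : List Int) (max_ngram_size minocc : Int) :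
    find_frequent_patterns_alt sequence max_ngram_size minocc =
    pvOut sequence minocc
      (Nat.findGreatest (fun k => ffpAltHas sequence minocc (k : Int) = true) max_ngram_size.toNat) := by
  simp only [find_frequent_patterns_alt, PySem.List.len_eq]
  by_cases hM : 1 ≤ min max_ngram_size (sequence.length : Int)
  · -- the search range is nonempty
    have hminNat : (min max_ngram_size (sequence.length : Int)).toNat =
        min max_ngram_size.toNat sequence.length := by omega
    have hG : Nat.findGreatest (fun k => ffpAltHas sequence minocc (k : Int) = true)
        max_ngram_size.toNat =
        Nat.findGreatest (fun k => ffpAltHas sequence minocc (k : Int) = true)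
        (min max_ngram_size (sequence.length : Int)).toNat := by
      apply findGreatest_restrict sequence minocc _ _ (by omega)
      intro k hk1 hk2 hP
      have : sequence.length < k := by omega
      rw [hasF_false_of_gt_len sequence minocc k this] at hP
      exact Bool.false_ne_true hP
    set N := Nat.findGreatest (fun k => ffpAltHas sequence minocc (k : Int) = true)
        (min max_ngram_size (sequence.length : Int)).toNat with hN
    have hNle : N ≤ (min max_ngram_size (sequence.length : Int)).toNat :=
      Nat.findGreatest_le _
    have hchar : ∀ n : Int, 1 ≤ n → n ≤ min max_ngram_size (sequence.length : Int) →
        (ffpAltHas sequence minocc n = true ↔ n ≤ (N : Int)) := by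
      intro n h1 h2
      have hn : n = ((n.toNat : Nat) : Int) := by omega
      constructor
      · intro hP
        rw [hn] at hP
        have := Nat.le_findGreatest (P := fun k => ffpAltHas sequence minocc (k : Int) = true)
          (by omega : n.toNat ≤ (min max_ngram_size (sequence.length : Int)).toNat) hP
        omega
      · intro hle
        have hN0 : N ≠ 0 := by omega
        have : ¬ (Nat.findGreatest (fun k => ffpAltHas sequence minocc (k : Int) = true)
            (min max_ngram_size (sequence.length : Int)).toNat = 0) := by rw [← hN]; exact hN0
        rw [Nat.findGreatest_eq_zero_iff] at this
        push Not at this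
        obtain ⟨m', h0, hm', hPm'⟩ := this
        have hPN : ffpAltHas sequence minocc (N : Int) = true :=
          Nat.findGreatest_spec (P := fun k => ffpAltHas sequence minocc (k : Int) = true)
            hm' hPm'
        rw [hn]
        exact hasF_down sequence minocc n.toNat N (by omega) hPN
    have hs : ffpAltSearch sequence minocc 1 (min max_ngram_size (sequence.length : Int)) 0 =
        (N : Int) := by
      apply search_eq sequence minocc (min max_ngram_size (sequence.length : Int)) N hchar
        ((min max_ngram_size (sequence.length : Int) + 1 - 1).toNat) 1
        (min max_ngram_size (sequence.length : Int)) 0 rfl (by omega) (by omega)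
        (by omega) (by omega) (by omega)
    rw [hs, hG]
    by_cases hN0 : N = 0
    · rw [if_pos (by exact_mod_cast hN0), hN0]
      rfl
    · rw [if_neg (by exact_mod_cast hN0)]
      unfold pvOut
      rw [if_neg hN0]
      have hfold := fold_ins_eq (pvFP sequence minocc (N : Int)) PySem.Dict.empty
        (fp_keys_nodup sequence minocc (N : Int)) (fun p _ => PySem.Dict.contains_empty _)
      rw [hfold]
      rfl
  · -- empty search range: no frequent pattern at any admissible size
    have hs : ffpAltSearch sequence minocc 1 (min max_ngram_size (sequence.length : Int)) 0 = 0 := by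
      rw [ffpAltSearch, dif_neg (by omega)]
    rw [hs, if_pos rfl]
    have hG : Nat.findGreatest (fun k => ffpAltHas sequence minocc (k : Int) = true)
        max_ngram_size.toNat = 0 := by
      rw [Nat.findGreatest_eq_zero_iff]
      intro n h0 hn hP
      have : sequence.length < n := by omega
      rw [hasF_false_of_gt_len sequence minocc n this] at hP
      exact Bool.false_ne_true hP
    rw [hG]
    rfl

-- ===== VERDICT (by name: the statement is the Claim_ definition above) =====
theorem find_frequent_patterns_spec : Claim_equal_find_frequent_patterns := by
  intro sequence max_ngram_size min_occurrences _
  unfold Spec_find_frequent_patterns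
  rw [alt_eq_pvOut]
  unfold find_frequent_patterns
  by_cases hmax : max_ngram_size ≤ 0
  · rw [PySem.List.pyRange_neg_one_eq_nil hmax,
      (by omega : max_ngram_size.toNat = 0), Nat.findGreatest_zero]
    rfl
  · rw [(by omega : max_ngram_size = (max_ngram_size.toNat : Int))]
    rw [loopA_eq, Int.toNat_natCast]
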